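-- pv_equiv track=rewrite | github.com/pypi-data/pypi-mirror-232 | packages/formgen/formgen-0.1.0.tar.gz/formgen-0.1.0/formgen/utils.py | repeatPattern
-- ===== SOURCE A (Python) =====
-- def countRepeatedElements(seg):
--     """
--     Return the number of repeated-elements in the input seg.
--
--     >>> countRepeatedElements([3, 3, 1, 2, 2, 3])
--     3
--
--     :param seg: contour segment.
--     :type seg: segment
--     :return: the number of repeated-elements in the input seg.
--     :rtype: int
--     """
--     return len(seg) - len(set(seg))
--
-- def repeatPattern(seg):
--     """
--     Return the pattern of repeated-elements in the input seg.
--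
--     >>> repeatPattern([0, 3, 2, 1])
--     0
--     >>> repeatPattern([3, 4, 1, 3, 0])
--     1
--     >>> repeatPattern([3, 1, 0, 0, 2])
--     2
--
--     :param seg: contour segment.
--     :type seg: segment
--     :return: the pattern of repeated-elements in the input seg:
--
--         * no repeat exists (0)
--         * non-consecutive repeat(s) exists (1)
--         * consecutive repeat(s) exists (2)
--
--     :rtype: int
--     """
--     # No repeated-elements
--     if countRepeatedElements(seg) == 0:
--         return 0
--     # One or more repeated-elements
--     else:
--         # Check the presence of consecutively repeated elements.
--         for i in range(len(seg) - 1):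
--             if seg[i] == seg[i+1]:
--                 return 2
--         # Non-consecutive repeat(s) exist.
--         return 1
-- ===== SOURCE B (Python) =====
-- def repeatPattern(seg):
--     seen = set()
--     prev = None
--     first = True
--     consec = False
--     dup = False
--     for x in seg:
--         if (not first) and x == prev:
--             consec = True
--         if x in seen:
--             dup = True
--         seen.add(x)
--         prev = x
--         first = False
--     return 2 if consec else (1 if dup else 0)
-- ===== Notes on version B (the rewrite author's own statement) =====
-- stated objective: simpler
-- what changed: Replaced the build-a-set-then-rescan-by-index structure (len(set) count followed by an indexed range scan with early return) with a single pass over the elements that incrementally maintains a seen-set, the previous element and two flags, deciding the result after the loop.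
import Mathlib
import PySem

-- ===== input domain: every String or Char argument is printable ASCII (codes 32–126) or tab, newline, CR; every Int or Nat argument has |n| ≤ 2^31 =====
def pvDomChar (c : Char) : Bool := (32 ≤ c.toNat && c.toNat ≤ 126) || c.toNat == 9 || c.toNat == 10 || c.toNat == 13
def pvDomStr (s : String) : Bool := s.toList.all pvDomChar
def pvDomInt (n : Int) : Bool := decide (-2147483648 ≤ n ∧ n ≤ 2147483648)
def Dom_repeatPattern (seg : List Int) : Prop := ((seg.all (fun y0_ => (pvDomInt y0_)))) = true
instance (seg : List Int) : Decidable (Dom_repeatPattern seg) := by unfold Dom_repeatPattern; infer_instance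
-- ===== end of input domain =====

-- B replaces A's build-set-then-rescan-by-index structure with one pass maintaining a seen-set, the previous element and two flags (objective: simpler).

-- ===== PORT A =====
def countRepeatedElements (seg : List Int) : Int :=
  (seg.length : Int) - ((PySem.Set.ofList seg).length : Int)

-- the for-i loop with early 'return 2'; seg[i]/seg[i+1] are always in range for i ∈ range(len-1)
def repeatPatternScan (seg : List Int) : List Int → Int
  | [] => 1
  | i :: rest =>
      if PySem.List.pyGetD seg i 0 = PySem.List.pyGetD seg (i + 1) 0 then 2
      else repeatPatternScan seg rest

def repeatPattern (seg : List Int) : Int :=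
  if countRepeatedElements seg = 0 then 0
  else repeatPatternScan seg (PySem.List.pyRange 0 ((seg.length : Int) - 1) 1)

-- ===== PORT B =====
-- state: (seen, prev (none = first), consec, dup)
def altStep (st : PySem.Set Int × Option Int × Bool × Bool) (x : Int) :
    PySem.Set Int × Option Int × Bool × Bool :=
  let consec := if st.2.1 = some x then true else st.2.2.1
  let dup := if PySem.Set.contains st.1 x then true else st.2.2.2
  (PySem.Set.add st.1 x, some x, consec, dup)

def repeatPattern_alt (seg : List Int) : Int :=
  if (seg.foldl altStep (PySem.Set.empty, none, false, false)).2.2.1 then 2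
  else if (seg.foldl altStep (PySem.Set.empty, none, false, false)).2.2.2 then 1 else 0

-- ===== PRECONDITION & SPEC =====
def Spec_repeatPattern (seg : List Int) (out : Int) : Prop := out = repeatPattern_alt seg
instance (seg : List Int) (out : Int) : Decidable (Spec_repeatPattern seg out) := by unfold Spec_repeatPattern; infer_instance

-- ===== CLAIM (what is proved, stated in full; the proofs are below) =====
def Claim_equal_repeatPattern : Prop := ∀ (seg : List Int), Dom_repeatPattern seg → Spec_repeatPattern seg (repeatPattern seg)

-- ===== LEMMAS AND PROOFS =====

-- abstract "has an adjacent equal pair"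
def hasAdj : List Int → Bool
  | [] => false
  | [_] => false
  | x :: y :: t => x = y || hasAdj (y :: t)

lemma hasAdj_of_nodup : ∀ (l : List Int), l.Nodup → hasAdj l = false := by
  intro l h
  induction l with
  | nil => rfl
  | cons x t ih =>
    cases t with
    | nil => rfl
    | cons y u =>
      simp only [hasAdj, Bool.or_eq_false_iff, decide_eq_false_iff_not]
      rcases List.nodup_cons.mp h with ⟨hx, ht⟩
      exact ⟨by intro hxy; exact hx (hxy ▸ List.mem_cons_self), ih ht⟩

-- ---- A's count: zero iff Nodup ----
lemma ofList_length_eq (seg : List Int) :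
    (PySem.Set.ofList seg).length = seg.dedup.length := by
  have hperm : (PySem.Set.ofList seg).Perm seg.dedup := by
    refine (List.perm_ext_iff_of_nodup (PySem.Set.nodup_ofList seg) (List.nodup_dedup seg)).mpr ?_
    intro a; rw [PySem.Set.mem_ofList, List.mem_dedup]
  exact hperm.length_eq

lemma count_zero_iff (seg : List Int) :
    countRepeatedElements seg = 0 ↔ seg.Nodup := by
  unfold countRepeatedElements
  rw [ofList_length_eq]
  constructor
  · intro h
    have hlen : seg.dedup.length = seg.length := by omega
    have := (List.dedup_sublist seg).eq_of_length hlen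
    rw [← this]; exact seg.nodup_dedup
  · intro h; rw [List.Nodup.dedup h]; omega

-- ---- A's scan equals hasAdj ----
lemma scan_eq (seg : List Int) : ∀ (n j : Nat), j + n + 1 = seg.length →
    repeatPatternScan seg ((List.range n).map (fun k => ((j + k : Nat) : Int))) =
      if hasAdj (seg.drop j) then 2 else 1 := by
  intro n
  induction n with
  | zero =>
    intro j hj
    have hdrop : seg.drop j = [seg[j]'(by omega)] := by
      rw [List.drop_eq_getElem_cons (l := seg) (i := j) (by omega),
        List.drop_eq_nil_of_le (by omega)]
    rw [hdrop]
    simp [repeatPatternScan, hasAdj]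
  | succ m ih =>
    intro j hj
    rw [List.range_succ_eq_map]
    have hj1 : j < seg.length := by omega
    have hj2 : j + 1 < seg.length := by omega
    have hget1 : PySem.List.pyGetD seg ((j + 0 : Nat) : Int) 0 = seg[j]'hj1 := by
      rw [PySem.List.pyGetD_eq_getElem seg 0 (Int.natCast_nonneg _)
        (by exact_mod_cast (by omega : j + 0 < seg.length))]
      simp
    have hget2 : PySem.List.pyGetD seg (((j + 0 : Nat) : Int) + 1) 0 = seg[j+1]'hj2 := by
      have hcast : (((j + 0 : Nat) : Int) + 1) = ((j + 1 : Nat) : Int) := by push_cast; ring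
      rw [hcast, PySem.List.pyGetD_eq_getElem seg 0 (Int.natCast_nonneg _)
        (by exact_mod_cast hj2)]
      simp
    have hdropj : seg.drop j = seg[j]'hj1 :: seg.drop (j+1) := List.drop_eq_getElem_cons hj1
    have hdropj1 : seg.drop (j+1) = seg[j+1]'hj2 :: seg.drop (j+2) := List.drop_eq_getElem_cons hj2
    simp only [List.map_cons, List.map_map, repeatPatternScan]
    rw [hget1, hget2, hdropj, hdropj1]
    by_cases heq : seg[j]'hj1 = seg[j+1]'hj2
    · rw [if_pos heq]
      simp [hasAdj, heq]
    · have hmap : (List.range m).map ((fun k => ((j + k : Nat) : Int)) ∘ Nat.succ)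
          = (List.range m).map (fun k => (((j+1) + k : Nat) : Int)) := by
        apply List.map_congr_left; intro k _
        simp only [Function.comp_apply, Nat.succ_eq_add_one]
        push_cast; ring
      rw [if_neg heq, hmap, ih (j+1) (by omega), hdropj1]
      simp [hasAdj, heq]

-- ---- B's flags ----
def bConsec : Option Int → List Int → Bool
  | _, [] => false
  | prev, x :: t => (prev = some x) || bConsec (some x) t

def bDup : PySem.Set Int → List Int → Bool
  | _, [] => false
  | seen, x :: t => PySem.Set.contains seen x || bDup (PySem.Set.add seen x) t

lemma foldB (rest : List Int) : ∀ (seen : PySem.Set Int) (prev : Option Int) (c d : Bool),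
    (rest.foldl altStep (seen, prev, c, d)).2.2 =
      (c || bConsec prev rest, d || bDup seen rest) := by
  induction rest with
  | nil => intro seen prev c d; simp [bConsec, bDup]
  | cons x t ih =>
    intro seen prev c d
    simp only [List.foldl_cons, altStep, bConsec, bDup]
    rw [ih]
    simp only [Prod.mk.injEq]
    constructor
    · split_ifs with h <;> simp [h]
    · by_cases h : x ∈ seen
      · have hc : PySem.Set.contains seen x = true := (PySem.Set.contains_iff _ _).mpr h
        simp [h]
      · have hc : PySem.Set.contains seen x = false := by
          rw [Bool.eq_false_iff]
          intro hcc
          exact h ((PySem.Set.contains_iff _ _).mp hcc)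
        simp [h]

lemma bConsec_some (t : List Int) : ∀ (a : Int), bConsec (some a) t = hasAdj (a :: t) := by
  induction t with
  | nil => intro a; rfl
  | cons x u ih => intro a; simp only [bConsec, hasAdj, ih]; simp

lemma bConsec_none (seg : List Int) : bConsec none seg = hasAdj seg := by
  cases seg with
  | nil => rfl
  | cons x t => simp only [bConsec]; rw [bConsec_some]; simp

lemma bDup_iff (l : List Int) : ∀ (seen : PySem.Set Int),
    bDup seen l = true ↔ (¬ l.Nodup ∨ ∃ x ∈ l, x ∈ seen) := by
  induction l with
  | nil => intro seen; simp [bDup]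
  | cons x t ih =>
    intro seen
    simp only [bDup, Bool.or_eq_true, PySem.Set.contains_iff, ih, List.nodup_cons]
    constructor
    · rintro (h | h | ⟨y, hy, hmem⟩)
      · exact Or.inr ⟨x, List.mem_cons_self, h⟩
      · tauto
      · rcases (PySem.Set.mem_add _ _ _).mp hmem with h' | h'
        · exact Or.inr ⟨y, List.mem_cons_of_mem _ hy, h'⟩
        · exact Or.inl (fun hc => hc.1 (h' ▸ hy))
    · rintro (h | ⟨y, hy, hmem⟩)
      · by_cases hx : x ∈ t
        · exact Or.inr (Or.inr ⟨x, hx, (PySem.Set.mem_add _ _ _).mpr (Or.inr rfl)⟩)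
        · exact Or.inr (Or.inl (by tauto))
      · rcases List.mem_cons.mp hy with rfl | hy'
        · exact Or.inl hmem
        · exact Or.inr (Or.inr ⟨y, hy', (PySem.Set.mem_add _ _ _).mpr (Or.inl hmem)⟩)

lemma alt_characterize (seg : List Int) :
    repeatPattern_alt seg =
      if hasAdj seg then 2 else if seg.Nodup then 0 else 1 := by
  unfold repeatPattern_alt
  rw [foldB, bConsec_none]
  by_cases h : hasAdj seg = true
  · simp [h]
  · by_cases hn : seg.Nodup
    · have hb : bDup ([] : List Int) seg = false := by
        rw [Bool.eq_false_iff]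
        intro hc
        rcases (bDup_iff seg _).mp hc with h1 | ⟨x, _, hx⟩
        · exact h1 hn
        · simp at hx
      simp [h, hb, hn]
    · have hb : bDup ([] : List Int) seg = true := (bDup_iff seg _).mpr (Or.inl hn)
      simp [h, hb, hn]

-- ===== VERDICT (by name: the statement is the Claim_ definition above) =====
theorem repeatPattern_spec : Claim_equal_repeatPattern := by
  intro seg _
  unfold Spec_repeatPattern
  rw [alt_characterize]
  unfold repeatPattern
  by_cases hc : countRepeatedElements seg = 0
  · have hn : seg.Nodup := (count_zero_iff seg).mp hc
    rw [if_pos hc, hasAdj_of_nodup seg hn]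
    simp [hn]
  · have hn : ¬ seg.Nodup := fun h => hc ((count_zero_iff seg).mpr h)
    rw [if_neg hc]
    have hlen : 1 ≤ seg.length := by
      rcases seg with _ | ⟨x, t⟩
      · exact absurd List.nodup_nil hn
      · simp
    have hrange : PySem.List.pyRange 0 ((seg.length : Int) - 1) 1
        = (List.range (seg.length - 1)).map (fun k => ((0 + k : Nat) : Int)) := by
      rw [PySem.List.pyRange_one]
      have h1 : (((seg.length : Int) - 1) - 0).toNat = seg.length - 1 := by omega
      rw [h1]
      apply List.map_congr_left
      intro k _
      simp
    rw [hrange, scan_eq seg (seg.length - 1) 0 (by omega)]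
    simp [hn]
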